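-- pv_equiv track=rewrite | github.com/JRA2002/python_problems | arrays/geeksforgeeks/easy/last_seen_element.py | last_seen_element
-- ===== SOURCE A (Python) =====
-- def last_seen_element(arr: list):
--     dict1 = {}
--     mini = len(arr)
--     for i in range(len(arr)-1, -1, -1):
--         if arr[i] not in dict1:
--             dict1[arr[i]] = i
--             if i <= mini:
--                 mini = i
--     return arr[mini]
-- ===== SOURCE B (Python) =====
-- def last_seen_element(arr: list):
--     # forward scan: the answer is the first element with no later occurrence
--     for i, x in enumerate(arr):
--         if x not in arr[i + 1:]:
--             return x
-- ===== Notes on version B (the rewrite author's own statement) =====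
-- stated objective: simpler
-- what changed: Replaces the backward index loop with a dict of last-occurrence indices and an inline minimum by a plain forward scan returning the first element that does not occur again later.
import Mathlib
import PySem

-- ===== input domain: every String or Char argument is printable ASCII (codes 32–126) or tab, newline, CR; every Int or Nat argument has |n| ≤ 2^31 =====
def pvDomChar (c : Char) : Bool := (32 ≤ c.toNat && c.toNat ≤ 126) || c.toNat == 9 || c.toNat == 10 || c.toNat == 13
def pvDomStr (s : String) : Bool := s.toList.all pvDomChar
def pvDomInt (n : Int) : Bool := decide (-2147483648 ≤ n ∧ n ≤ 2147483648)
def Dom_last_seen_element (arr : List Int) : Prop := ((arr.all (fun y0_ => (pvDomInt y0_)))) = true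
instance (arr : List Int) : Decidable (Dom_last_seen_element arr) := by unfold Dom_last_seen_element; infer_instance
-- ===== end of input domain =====

-- B replaces A's backward index loop (dict of last-occurrence indices + inline minimum) by a plain
-- forward scan returning the first element with no later occurrence: simpler, not faster.

-- ===== PORT A =====
-- loop body: if arr[i] not in dict1: dict1[arr[i]] = i; if i <= mini: mini = i
def pvAStep (arr : List Int) (st : PySem.Dict Int Int × Int) (i : Int) : PySem.Dict Int Int × Int :=
  let x := PySem.List.pyGetD arr i 0   -- arr[i]; i is drawn from range(len(arr)-1, -1, -1), always in range, so exact
  if st.1.contains x then st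
  else (st.1.insert x i, if i ≤ st.2 then i else st.2)

def last_seen_element (arr : List Int) : Int :=
  let st := (PySem.List.pyRange (PySem.List.len arr - 1) (-1) (-1)).foldl (pvAStep arr) (PySem.Dict.empty, PySem.List.len arr)
  PySem.List.pyGetD arr st.2 0   -- arr[mini]; in range for arr ≠ [] (Pre_ excludes the empty list, where Python raises IndexError)

-- ===== PORT B =====
-- for i, x in enumerate(arr): if x not in arr[i+1:]: return x   (rest of the list = arr[i+1:])
def pvAltGo : List Int → Int
  | [] => 0   -- unreachable under Pre_: the Python loop always returns on a nonempty list
  | x :: rest => if x ∈ rest then pvAltGo rest else x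

def last_seen_element_alt (arr : List Int) : Int := pvAltGo arr

-- ===== PRECONDITION & SPEC =====
-- On the empty list A raises IndexError (arr[mini] with mini = 0 = len(arr)); Pre_ excludes exactly it.
def Pre_last_seen_element (arr : List Int) : Prop := arr ≠ []
instance (arr : List Int) : Decidable (Pre_last_seen_element arr) := by unfold Pre_last_seen_element; infer_instance
def pvWitness_last_seen_element : List Int := [3, 1, 3, 2]

def Spec_last_seen_element (arr : List Int) (out : Int) : Prop := out = last_seen_element_alt arr
instance (arr : List Int) (out : Int) : Decidable (Spec_last_seen_element arr out) := by unfold Spec_last_seen_element; infer_instance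

-- ===== CLAIM (what is proved, stated in full; the proofs are below) =====
def Claim_equal_last_seen_element : Prop := ∀ (arr : List Int), Dom_last_seen_element arr → Pre_last_seen_element arr → Spec_last_seen_element arr (last_seen_element arr)

-- ===== LEMMAS AND PROOFS =====

-- range(a, b, -1) decomposed at its LAST element b+1 (the fold's final step)
lemma pvRange_neg_one_snoc (a b : Int) (h : b < a) :
    PySem.List.pyRange a b (-1) = PySem.List.pyRange a (b + 1) (-1) ++ [b + 1] := by
  rw [PySem.List.pyRange_neg_one_eq_reverse, PySem.List.pyRange_one_cons (by omega),
    List.reverse_cons, PySem.List.pyRange_neg_one_eq_reverse]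

-- A's fold, started at the state reached before processing index p-? : the fold over indices n-1 .. p
def pvFold (arr : List Int) (p : Int) : PySem.Dict Int Int × Int :=
  (PySem.List.pyRange ((arr.length : Int) - 1) (p - 1) (-1)).foldl (pvAStep arr) (PySem.Dict.empty, (arr.length : Int))

lemma pvFold_step (arr : List Int) (p : Int) (h : p < (arr.length : Int)) :
    pvFold arr p = pvAStep arr (pvFold arr (p + 1)) p := by
  unfold pvFold
  rw [pvRange_neg_one_snoc _ _ (show p - 1 < (arr.length : Int) - 1 by omega), List.foldl_append]
  norm_num

lemma pvFold_base (arr : List Int) : pvFold arr (arr.length : Int) = (PySem.Dict.empty, (arr.length : Int)) := by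
  unfold pvFold
  rw [PySem.List.pyRange_neg_one_eq_nil (by omega)]
  rfl

lemma pvGetD_at_split (pre suf : List Int) (y : Int) :
    PySem.List.pyGetD (pre ++ y :: suf) ((pre.length : Int)) 0 = y := by
  rw [PySem.List.pyGetD_natCast]
  simp [List.getD]

-- invariant of A's backward fold over the indices of the suffix `suf` of arr = pre ++ suf:
-- the dict's keys are exactly the values of suf, mini lies in the index range of suf, and
-- arr[mini] is exactly what B's forward scan returns on suf.
lemma pvFold_spec (suf : List Int) : ∀ (pre : List Int), suf ≠ [] →
    (∀ v : Int, (pvFold (pre ++ suf) (pre.length : Int)).1.contains v = true ↔ v ∈ suf) ∧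
    (pre.length : Int) ≤ (pvFold (pre ++ suf) (pre.length : Int)).2 ∧
    (pvFold (pre ++ suf) (pre.length : Int)).2 < ((pre ++ suf).length : Int) ∧
    PySem.List.pyGetD (pre ++ suf) (pvFold (pre ++ suf) (pre.length : Int)).2 0 = pvAltGo suf := by
  induction suf with
  | nil => intro pre h; exact absurd rfl h
  | cons y suf' IH =>
    intro pre _
    have hlen : (pre.length : Int) < ((pre ++ y :: suf').length : Int) := by
      simp
    rw [pvFold_step _ _ hlen]
    by_cases hsuf' : suf' = []
    · subst hsuf'
      have hn : (pre.length : Int) + 1 = ((pre ++ [y]).length : Int) := by simp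
      rw [hn, pvFold_base]
      have hif : (if (pre.length : Int) ≤ ((pre ++ [y]).length : Int) then (pre.length : Int)
          else ((pre ++ [y]).length : Int)) = (pre.length : Int) := by
        rw [if_pos]; simp
      simp only [pvAStep, pvGetD_at_split, PySem.Dict.contains_empty, Bool.false_eq_true,
        if_false, hif]
      refine ⟨?_, le_refl _, by simp, by simp [pvAltGo]⟩
      intro v
      rw [PySem.Dict.contains_insert]
      simp [PySem.Dict.contains_empty]
    · -- reuse the invariant for suf' with pre' = pre ++ [y]
      have IH' := IH (pre ++ [y]) hsuf'
      rw [List.append_assoc] at IH'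
      have hp1 : ((pre ++ [y]).length : Int) = (pre.length : Int) + 1 := by simp
      rw [hp1] at IH'
      simp only [List.singleton_append] at IH'
      obtain ⟨hmem, hlo, hhi, hval⟩ := IH'
      simp only [pvAStep, pvGetD_at_split]
      by_cases hy : y ∈ suf'
      · rw [if_pos ((hmem y).mpr hy)]
        refine ⟨?_, by omega, hhi, ?_⟩
        · intro v
          rw [hmem v]
          constructor
          · exact fun h => List.mem_cons_of_mem _ h
          · intro h
            rcases List.mem_cons.mp h with h | h
            · subst h; exact hy
            · exact h
        · rw [hval]
          simp [pvAltGo, hy]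
      · have hnc : ¬ ((pvFold (pre ++ y :: suf') ((pre.length : Int) + 1)).1.contains y = true) :=
          fun h => hy ((hmem y).mp h)
        rw [if_neg hnc, if_pos (by omega)]
        refine ⟨?_, le_refl _, by omega, ?_⟩
        · intro v
          rw [PySem.Dict.contains_insert]
          simp only [Bool.or_eq_true, beq_iff_eq, hmem v, List.mem_cons]
        · rw [pvGetD_at_split]
          simp [pvAltGo, hy]

theorem pv_main (arr : List Int) (h : arr ≠ []) : last_seen_element arr = last_seen_element_alt arr := by
  have hinv := pvFold_spec arr [] h
  simp only [List.nil_append, List.length_nil, Nat.cast_zero] at hinv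
  unfold last_seen_element last_seen_element_alt
  simp only [PySem.List.len_eq]
  have : (PySem.List.pyRange ((arr.length : Int) - 1) (-1) (-1)).foldl (pvAStep arr)
      (PySem.Dict.empty, (arr.length : Int)) = pvFold arr 0 := by
    unfold pvFold; norm_num
  rw [this]
  exact hinv.2.2.2

-- ===== VERDICT (by name: the statement is the Claim_ definition above) =====
theorem last_seen_element_spec : Claim_equal_last_seen_element := by
  intro arr _ hpre
  unfold Spec_last_seen_element
  exact pv_main arr hpre
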